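-- pv_equiv track=rewrite | github.com/Poto45/final_AWA_beamline | Simulation/Opal-T/opt_func.py | getMesh
-- ===== SOURCE A (Python) =====
-- def getMesh(N, type='t'):
--     '''
--     compute Nx, Ny, Nz for IMPACT-T input.
--     Number of macro-particles should be less than five in each cell.
--     Use 't' to focus on transverse plane, 'l' to focus on longitudinal plane.
--     '''
--     i = 2
--     if type=='t':
--         while 2**(3*i-1)<N/5:i+=1
--         return 2**i,2**i,2**(i-1)
--     elif type=='l':
--         while 2**(3*i-2)<N/5:i+=1
--         return 2**(i-1),2**(i-1),2**i
--     else: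
--         raise ValueError('Wrong type. Use t or l')
-- ===== SOURCE B (Python) =====
-- def getMesh(N, type='t'):
--     '''Closed-form mesh sizes: smallest i>=2 with 2**(3*i-off) >= ceil(N/5), no loop.'''
--     if type == 't':
--         off = 1
--     elif type == 'l':
--         off = 2
--     else:
--         raise ValueError('Wrong type. Use t or l')
--     m = (N + 4) // 5                               # ceil(N/5) as an exact integer
--     k = (m - 1).bit_length() if m >= 2 else 0      # smallest k with 2**k >= m
--     i = max(2, (k + off + 2) // 3)                 # smallest i>=2 with 3*i-off >= k
--     if type == 't':
--         return 2**i, 2**i, 2**(i - 1)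
--     return 2**(i - 1), 2**(i - 1), 2**i
-- ===== Notes on version B (the rewrite author's own statement) =====
-- stated objective: alternative
-- what changed: Replaces A's while-loop doubling search with a closed-form exponent computed from the bit length of ceil(N/5), clamped at i>=2; same tuples and same ValueError for other types.
-- outside the precondition, e.g. on getMesh(100, 'x'): A raises ValueError, B raises ValueError
import Mathlib
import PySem

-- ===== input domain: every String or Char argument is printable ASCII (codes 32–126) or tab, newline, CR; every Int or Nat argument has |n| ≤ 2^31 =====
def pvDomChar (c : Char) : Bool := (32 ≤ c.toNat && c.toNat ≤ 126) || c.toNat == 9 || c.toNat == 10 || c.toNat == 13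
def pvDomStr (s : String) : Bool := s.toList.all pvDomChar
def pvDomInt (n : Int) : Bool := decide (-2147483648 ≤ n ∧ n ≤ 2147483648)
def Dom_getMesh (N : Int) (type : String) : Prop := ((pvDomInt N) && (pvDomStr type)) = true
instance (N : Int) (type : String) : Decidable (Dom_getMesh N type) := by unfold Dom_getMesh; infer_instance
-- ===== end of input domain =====

-- B replaces A's doubling while-loop by a closed-form exponent from ceil(N/5)'s bit length; same returns, same ValueError domain.

-- ===== PORT A =====
-- A's loop test is `2**(3*i-1) < N/5` with float N/5; for |N| ≤ 2^31 the float comparison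
-- is exact and equivalent to the integer comparison 5*2^(3*i-1) < N (N/5 rounds by less
-- than 2^-20 while the gap to the integer power is ≥ 1/5 unless exactly equal), so the
-- port uses the exact integer test.
-- The loops recurse on an explicit fuel so the recursion is structural; fuel 64 is never
-- exhausted for |N| ≤ 2^31 (the loop stops once 5*2^(3i-1) ≥ N, i.e. within ~12 steps),
-- so on the stated domain this computes exactly A's while-loop.
def loopT (fuel : Nat) (N : Int) (i : Nat) : Nat :=
  match fuel with
  | 0 => i
  | f + 1 => if 5 * (2:Int) ^ (3*i-1) < N then loopT f N (i+1) else i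

def loopL (fuel : Nat) (N : Int) (i : Nat) : Nat :=
  match fuel with
  | 0 => i
  | f + 1 => if 5 * (2:Int) ^ (3*i-2) < N then loopL f N (i+1) else i

def getMesh (N : Int) (type : String) : Int × Int × Int :=
  if type = "t" then
    let i := loopT 64 N 2
    ((2:Int) ^ i, 2 ^ i, 2 ^ (i-1))
  else if type = "l" then
    let i := loopL 64 N 2
    ((2:Int) ^ (i-1), 2 ^ (i-1), 2 ^ i)
  else (0, 0, 0)  -- A raises ValueError here; excluded by Pre_getMesh

-- ===== PORT B =====
-- k and i are nonnegative Python ints throughout, so they are carried as Nat;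
-- Python's `//` on these nonnegative values is Nat division.
def getMesh_alt (N : Int) (type : String) : Int × Int × Int :=
  if type = "t" ∨ type = "l" then
    let off : Nat := if type = "t" then 1 else 2
    let m : Int := PySem.Int.floordiv (N + 4) 5
    let k : Nat := if 2 ≤ m then PySem.Int.bitLength (m - 1) else 0
    let i : Nat := max 2 ((k + off + 2) / 3)
    if type = "t" then ((2:Int) ^ i, 2 ^ i, 2 ^ (i-1))
    else ((2:Int) ^ (i-1), 2 ^ (i-1), 2 ^ i)
  else (0, 0, 0)  -- B raises ValueError here; excluded by Pre_getMesh

-- ===== PRECONDITION & SPEC =====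
-- Pre_ excludes exactly the inputs where both A and B raise ValueError (type not 't'/'l').
def Pre_getMesh (N : Int) (type : String) : Prop := type = "t" ∨ type = "l"
instance (N : Int) (type : String) : Decidable (Pre_getMesh N type) := by unfold Pre_getMesh; infer_instance
def pvWitness_getMesh : Int × String := (1000, "t")

def Spec_getMesh (N : Int) (type : String) (out : Int × Int × Int) : Prop := out = getMesh_alt N type
instance (N : Int) (type : String) (out : Int × Int × Int) : Decidable (Spec_getMesh N type out) := by unfold Spec_getMesh; infer_instance

-- ===== CLAIM (what is proved, stated in full; the proofs are below) =====
def Claim_equal_getMesh : Prop := ∀ (N : Int) (type : String), Dom_getMesh N type → Pre_getMesh N type → Spec_getMesh N type (getMesh N type)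

-- ===== LEMMAS AND PROOFS =====

-- The loops return the first index ≥ start where the test fails.
lemma loopT_eq (N : Int) (t : Nat) (hstop : ¬ 5 * (2:Int) ^ (3*t-1) < N)
    (fuel i : Nat) (hle : i ≤ t) (hfuel : t ≤ i + fuel)
    (hgo : ∀ j, i ≤ j → j < t → 5 * (2:Int) ^ (3*j-1) < N) :
    loopT fuel N i = t := by
  induction fuel generalizing i with
  | zero =>
      have : i = t := by omega
      simpa [loopT] using this
  | succ f ih =>
      by_cases h : i = t
      · subst h; rw [loopT, if_neg hstop]
      · have hlt : i < t := by omega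
        rw [loopT, if_pos (hgo i le_rfl hlt)]
        exact ih (i+1) (by omega) (by omega) (fun j h1 h2 => hgo j (by omega) h2)

lemma loopL_eq (N : Int) (t : Nat) (hstop : ¬ 5 * (2:Int) ^ (3*t-2) < N)
    (fuel i : Nat) (hle : i ≤ t) (hfuel : t ≤ i + fuel)
    (hgo : ∀ j, i ≤ j → j < t → 5 * (2:Int) ^ (3*j-2) < N) :
    loopL fuel N i = t := by
  induction fuel generalizing i with
  | zero =>
      have : i = t := by omega
      simpa [loopL] using this
  | succ f ih =>
      by_cases h : i = t
      · subst h; rw [loopL, if_neg hstop]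
      · have hlt : i < t := by omega
        rw [loopL, if_pos (hgo i le_rfl hlt)]
        exact ih (i+1) (by omega) (by omega) (fun j h1 h2 => hgo j (by omega) h2)

-- For |N| ≤ 2^31 the bit length k is at most 31, so the target index fits in fuel 64.
lemma k_le_31 (m : Int) (k : Nat) (hmle : m ≤ 1073741824)
    (hk : k = if 2 ≤ m then PySem.Int.bitLength (m - 1) else 0) : k ≤ 31 := by
  by_cases hm : 2 ≤ m
  · simp only [hm, if_pos] at hk
    subst hk
    by_contra hgt
    have h1 : 2 ^ (PySem.Int.bitLength (m - 1) - 1) ≤ (m - 1).natAbs :=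
      PySem.Int.two_pow_bitLength_le _ (by omega)
    have h2 : (2:Nat) ^ 31 ≤ 2 ^ (PySem.Int.bitLength (m - 1) - 1) :=
      Nat.pow_le_pow_right (by norm_num) (by omega)
    have habs : ((m - 1).natAbs : Int) = m - 1 := Int.natAbs_of_nonneg (by omega)
    have : (2147483648 : Nat) ≤ (m - 1).natAbs := by
      calc (2147483648 : Nat) = 2 ^ 31 := by norm_num
        _ ≤ _ := le_trans h2 h1
    omega
  · simp only [hm, if_false] at hk
    omega

-- m := (N+4)//5 is ⌈N/5⌉: 5x ≥ N ↔ x ≥ m for integers x.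
lemma ceil_bounds (N : Int) : 5 * PySem.Int.floordiv (N + 4) 5 ≤ N + 4 ∧
    N + 4 < 5 * PySem.Int.floordiv (N + 4) 5 + 5 := by
  have h := PySem.Int.floordiv_mul_add_mod (N + 4) 5
  have h2 : 0 ≤ PySem.Int.mod (N + 4) 5 ∧ PySem.Int.mod (N + 4) 5 < 5 := by
    constructor
    · exact PySem.Int.mod_nonneg (a := N + 4) (b := 5) (by norm_num)
    · exact PySem.Int.mod_lt (a := N + 4) (b := 5) (by norm_num)
  omega

-- k characterises powers: 2^e ≥ m  ↔  e ≥ k (for the k computed by B).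
lemma k_pow_ge (m : Int) (k e : Nat)
    (hk : k = if 2 ≤ m then PySem.Int.bitLength (m - 1) else 0)
    (hke : k ≤ e) : m ≤ (2:Int) ^ e := by
  by_cases hm : 2 ≤ m
  · simp only [hm, if_pos] at hk
    subst hk
    have h1 : (m - 1).natAbs < 2 ^ PySem.Int.bitLength (m - 1) :=
      PySem.Int.lt_two_pow_bitLength _
    have habs : ((m - 1).natAbs : Int) = m - 1 := Int.natAbs_of_nonneg (by omega)
    have h2 : (2:Int) ^ PySem.Int.bitLength (m - 1) ≤ 2 ^ e := pow_le_pow_right₀ (by norm_num) hke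
    have h3 : m - 1 < (2:Int) ^ PySem.Int.bitLength (m - 1) := by
      calc m - 1 = ((m - 1).natAbs : Int) := habs.symm
        _ < (((2:Nat) ^ PySem.Int.bitLength (m - 1) : Nat) : Int) := by exact_mod_cast h1
        _ = (2:Int) ^ PySem.Int.bitLength (m - 1) := by push_cast; ring
    omega
  · have : (1:Int) ≤ 2 ^ e := one_le_pow₀ (by norm_num)
    omega

lemma k_pow_lt (m : Int) (k e : Nat)
    (hk : k = if 2 ≤ m then PySem.Int.bitLength (m - 1) else 0)
    (hek : e < k) : (2:Int) ^ e < m := by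
  by_cases hm : 2 ≤ m
  · simp only [hm, if_pos] at hk
    subst hk
    have hne : m - 1 ≠ 0 := by omega
    have h1 : 2 ^ (PySem.Int.bitLength (m - 1) - 1) ≤ (m - 1).natAbs :=
      PySem.Int.two_pow_bitLength_le _ hne
    have habs : ((m - 1).natAbs : Int) = m - 1 := Int.natAbs_of_nonneg (by omega)
    have h2 : (2:Int) ^ e ≤ 2 ^ (PySem.Int.bitLength (m - 1) - 1) :=
      pow_le_pow_right₀ (by norm_num) (by omega)
    have h3 : (2:Int) ^ (PySem.Int.bitLength (m - 1) - 1) ≤ m - 1 := by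
      calc (2:Int) ^ (PySem.Int.bitLength (m - 1) - 1)
          = (((2:Nat) ^ (PySem.Int.bitLength (m - 1) - 1) : Nat) : Int) := by push_cast; ring
        _ ≤ ((m - 1).natAbs : Int) := by exact_mod_cast h1
        _ = m - 1 := habs
    omega
  · simp only [hm, if_false] at hk
    omega

-- ===== VERDICT (by name: the statement is the Claim_ definition above) =====
theorem getMesh_spec : Claim_equal_getMesh := by
  intro N type hdom hpre
  have hNle : N ≤ 2147483648 := by
    unfold Dom_getMesh pvDomInt at hdom
    simp only [Bool.and_eq_true, decide_eq_true_eq] at hdom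
    exact hdom.1.2
  unfold Spec_getMesh getMesh getMesh_alt
  have hceil := ceil_bounds N
  set m : Int := PySem.Int.floordiv (N + 4) 5 with hm
  rcases hpre with h | h
  · subst h
    simp only [String.reduceEq, reduceIte, true_or, if_true]
    set k : Nat := if 2 ≤ m then PySem.Int.bitLength (m - 1) else 0 with hk
    set t : Nat := max 2 ((k + 1 + 2) / 3) with ht
    have hmle : m ≤ 1073741824 := by omega
    have hk31 : k ≤ 31 := k_le_31 m k hmle hk
    have hloop : loopT 64 N 2 = t := by
      apply loopT_eq
      · -- stop: 5*2^(3t-1) ≥ N, from 3t-1 ≥ k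
        have hkt : k ≤ 3*t-1 := by
          have : (k + 3) / 3 ≤ t := by omega
          omega
        have := k_pow_ge m k (3*t-1) hk hkt
        omega
      · omega
      · omega
      · intro j h2j hjt
        have htgt : 2 < t := by omega
        have hdiv : t = (k + 3) / 3 := by omega
        have hjk : 3*j-1 < k := by
          have h3t : 3 * t ≤ k + 3 := by omega
          omega
        have := k_pow_lt m k (3*j-1) hk hjk
        omega
    rw [hloop]
  · subst h
    simp only [String.reduceEq, or_true, if_true, if_false]
    set k : Nat := if 2 ≤ m then PySem.Int.bitLength (m - 1) else 0 with hk
    set t : Nat := max 2 ((k + 2 + 2) / 3) with ht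
    have hmle : m ≤ 1073741824 := by omega
    have hk31 : k ≤ 31 := k_le_31 m k hmle hk
    have hloop : loopL 64 N 2 = t := by
      apply loopL_eq
      · have hkt : k ≤ 3*t-2 := by
          have : (k + 4) / 3 ≤ t := by omega
          omega
        have := k_pow_ge m k (3*t-2) hk hkt
        omega
      · omega
      · omega
      · intro j h2j hjt
        have htgt : 2 < t := by omega
        have hdiv : t = (k + 4) / 3 := by omega
        have hjk : 3*j-2 < k := by
          have h3t : 3 * t ≤ k + 4 := by omega
          omega
        have := k_pow_lt m k (3*j-2) hk hjk
        omega
    rw [hloop]
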